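-- pv_equiv track=rewrite | github.com/rewinter799/STAT_37830 | hw0-rewinter799/egyptian.py | egyptian_multiplication
-- ===== SOURCE A (Python) =====
-- def egyptian_multiplication(a, n):
--     """
--     Returns the product a * n.
--
--     Assume n is a nonegative integer.
--     """
--     def isodd(n):
--         """
--         returns True if n is odd
--         """
--         return n & 0x1 == 1
--
--     if n == 1:
--         return a
--     if n == 0:
--         return 0
--
--     if isodd(n):
--         return egyptian_multiplication(a + a, n // 2) + a
--     else:
--         return egyptian_multiplication(a + a, n // 2)
-- ===== SOURCE B (Python) =====
-- def egyptian_multiplication(a, n):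
--     """Returns the product a * n (n a nonnegative integer), iteratively."""
--     acc = 0
--     while n > 0:
--         if n & 1:
--             acc += a
--         a += a
--         n //= 2
--     return acc
-- ===== Notes on version B (the rewrite author's own statement) =====
-- stated objective: idiomatic
-- what changed: Replaces the doubling/halving recursion (which adds the odd-step 'a' contributions on the way back up) with a single explicit while-loop that accumulates them in an accumulator.
import Mathlib
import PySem

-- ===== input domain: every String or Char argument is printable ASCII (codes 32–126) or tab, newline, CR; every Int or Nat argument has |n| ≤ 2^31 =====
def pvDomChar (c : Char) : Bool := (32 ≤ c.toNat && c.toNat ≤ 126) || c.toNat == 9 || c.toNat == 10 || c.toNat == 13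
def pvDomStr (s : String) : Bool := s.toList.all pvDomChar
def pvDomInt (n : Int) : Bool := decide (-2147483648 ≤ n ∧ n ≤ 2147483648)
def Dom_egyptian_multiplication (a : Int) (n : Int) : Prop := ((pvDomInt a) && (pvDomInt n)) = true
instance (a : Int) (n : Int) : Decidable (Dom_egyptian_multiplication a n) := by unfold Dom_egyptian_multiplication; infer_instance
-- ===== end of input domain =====

-- B replaces A's doubling/halving recursion by an explicit while-loop with an accumulator (same results for n ≥ 0).


-- ===== PORT A =====
-- inner helper isodd: Python 'n & 0x1 == 1'; for Python ints n & 1 = n % 2 exactly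
-- (floor mod, positive divisor), ported as PySem.Int.mod n 2 == 1.
def pyIsodd (n : Int) : Bool := PySem.Int.mod n 2 == 1

-- Python A recurses forever (RecursionError) for n < 0; the 'n < 0 → 0' branch is a
-- totality guard only, those inputs are outside Pre_.
def egyptian_multiplication (a : Int) (n : Int) : Int :=
  if n = 1 then a
  else if n = 0 then 0
  else if n < 0 then 0
  else if pyIsodd n then egyptian_multiplication (a + a) (PySem.Int.floordiv n 2) + a
  else egyptian_multiplication (a + a) (PySem.Int.floordiv n 2)
termination_by n.toNat
decreasing_by
  all_goals rw [PySem.Int.floordiv_eq_ediv_of_pos (by omega)]; omega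

-- ===== PORT B =====
-- while n > 0: if n & 1: acc += a; a += a; n //= 2   (n & 1 ported as PySem.Int.mod n 2 ≠ 0)
def egyptianLoop (acc : Int) (a : Int) (n : Int) : Int :=
  if 0 < n then
    egyptianLoop (if PySem.Int.mod n 2 ≠ 0 then acc + a else acc) (a + a) (PySem.Int.floordiv n 2)
  else acc
termination_by n.toNat
decreasing_by rw [PySem.Int.floordiv_eq_ediv_of_pos (by omega)]; omega

def egyptian_multiplication_alt (a : Int) (n : Int) : Int := egyptianLoop 0 a n

-- ===== PRECONDITION & SPEC =====
-- Pre_ excludes n < 0: there Python A recurses forever (RecursionError).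
def Pre_egyptian_multiplication (a : Int) (n : Int) : Prop := 0 ≤ n
instance (a : Int) (n : Int) : Decidable (Pre_egyptian_multiplication a n) := by unfold Pre_egyptian_multiplication; infer_instance
def pvWitness_egyptian_multiplication : Int × Int := (7, 13)

def Spec_egyptian_multiplication (a : Int) (n : Int) (out : Int) : Prop := out = egyptian_multiplication_alt a n
instance (a : Int) (n : Int) (out : Int) : Decidable (Spec_egyptian_multiplication a n out) := by unfold Spec_egyptian_multiplication; infer_instance

-- ===== CLAIM (what is proved, stated in full; the proofs are below) =====
def Claim_equal_egyptian_multiplication : Prop := ∀ (a : Int) (n : Int), Dom_egyptian_multiplication a n → Pre_egyptian_multiplication a n → Spec_egyptian_multiplication a n (egyptian_multiplication a n)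


-- ===== LEMMAS AND PROOFS =====

-- Loop invariant: for n ≥ 0 the loop adds A's recursive result onto the accumulator.
theorem egyptianLoop_eq_aux : ∀ (k : Nat) (n : Int), n.toNat = k → 0 ≤ n → ∀ (acc a : Int),
    egyptianLoop acc a n = acc + egyptian_multiplication a n := by
  intro k
  induction k using Nat.strong_induction_on with
  | _ k ih =>
    intro n hk hn acc a
    rw [egyptianLoop, egyptian_multiplication]
    by_cases h1 : n = 1
    · subst h1; simp [egyptianLoop, PySem.Int.floordiv]
    · by_cases h0 : n = 0
      · subst h0; simp
      · have h2 : 2 ≤ n := by omega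
        have hd : PySem.Int.floordiv n 2 = n / 2 :=
          PySem.Int.floordiv_eq_ediv_of_pos (by omega)
        have hm : PySem.Int.mod n 2 = n % 2 :=
          PySem.Int.mod_eq_emod_of_pos (by omega)
        have hrec := ih (n / 2).toNat (by omega) (n / 2) rfl (by omega)
        simp only [if_pos (show 0 < n by omega), if_neg h1, if_neg h0,
          if_neg (show ¬ n < 0 by omega), hd, hm]
        by_cases ho : n % 2 = 0
        · simp [pyIsodd, ho, hrec]
        · have ho1 : n % 2 = 1 := by omega
          simp [pyIsodd, ho1, hrec]; ring

theorem egyptianLoop_eq (n : Int) (hn : 0 ≤ n) (acc a : Int) :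
    egyptianLoop acc a n = acc + egyptian_multiplication a n :=
  egyptianLoop_eq_aux n.toNat n rfl hn acc a

-- ===== VERDICT (by name: the statement is the Claim_ definition above) =====
theorem egyptian_multiplication_spec : Claim_equal_egyptian_multiplication := by
  intro a n _ hpre
  show egyptian_multiplication a n = egyptian_multiplication_alt a n
  rw [egyptian_multiplication_alt, egyptianLoop_eq n hpre, zero_add]
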